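-- pv_equiv track=rewrite | github.com/lingpy/lingrex | src/lingrex/copar.py | consensus_pattern
-- ===== SOURCE A (Python) =====
-- def consensus_pattern(patterns, missing="Ø"):
--     """Return consensus pattern of multiple patterns.
--
--     Parameters
--     ----------
--     patterns : list
--         List of patterns (each pattern should be a sequence, preferably a
--         list).
--     gap : str (default="Ø")
--         A gap in the sense of "missing data", that is, a cognate set for which
--         a value in a given language is absent.
--
--     Returns
--     -------
--     consensus : list
--         A one-dimensional list.
--
--     Note
--     ----
--     This consensus method raises an error if the patterns contain incompatible
--     columns (non-identical values apart from the gap character in the same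
--     column).
--     """
--     out = []
--     for i in range(len(patterns[0])):
--         col = [line[i] for line in patterns]
--         no_gaps = [x for x in col if x != missing]
--         if len(set(no_gaps)) > 1:
--             raise ValueError("Your patterns are incompatible")
--         out += [no_gaps[0] if no_gaps else missing]
--     return tuple(out)
-- ===== SOURCE B (Python) =====
-- def consensus_pattern(patterns, missing="Ø"):
--     consensus = list(patterns[0])
--     for line in patterns[1:]:
--         for i in range(len(patterns[0])):
--             v = line[i]
--             if v != missing:
--                 if consensus[i] == missing:
--                     consensus[i] = v
--                 elif consensus[i] != v:
--                     raise ValueError("Your patterns are incompatible")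
--     return tuple(consensus)
-- ===== Notes on version B (the rewrite author's own statement) =====
-- stated objective: faster
-- what changed: Replaces A's per-column list/set construction (col, no_gaps, set(no_gaps) for every column) with a single running consensus initialized from the first pattern and merged pairwise with each further line, avoiding all per-column allocations.
import Mathlib
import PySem

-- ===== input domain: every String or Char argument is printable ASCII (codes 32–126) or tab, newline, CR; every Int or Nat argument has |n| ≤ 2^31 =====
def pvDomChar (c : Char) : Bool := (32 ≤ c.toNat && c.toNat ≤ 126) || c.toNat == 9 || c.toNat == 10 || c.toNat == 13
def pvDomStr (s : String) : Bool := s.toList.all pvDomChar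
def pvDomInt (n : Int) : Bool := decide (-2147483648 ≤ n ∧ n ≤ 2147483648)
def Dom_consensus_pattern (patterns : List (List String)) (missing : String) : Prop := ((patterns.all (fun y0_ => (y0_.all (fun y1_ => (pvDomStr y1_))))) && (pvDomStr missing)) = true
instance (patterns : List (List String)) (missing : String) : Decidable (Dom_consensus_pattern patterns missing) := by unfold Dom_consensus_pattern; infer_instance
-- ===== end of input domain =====

-- B replaces A's per-column list/set construction by one running consensus merged
-- pairwise with each further line (same asymptotic cost, different decomposition).

-- ===== PORT A =====
-- Literal port of A. The two raising paths of A (IndexError on a short line,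
-- ValueError on an incompatible column) are excluded by Pre_consensus_pattern;
-- on those paths the port reads `missing` / the first non-gap value instead.
def consensus_pattern (patterns : List (List String)) (missing : String) : List String :=
  (List.range (patterns.headD []).length).foldl
    (fun out i =>
      let col := patterns.map (fun line => (PySem.List.pyGet? line (Int.ofNat i)).getD missing)
      let no_gaps := col.filter (fun x => x ≠ missing)
      -- `if len(set(no_gaps)) > 1: raise ValueError(...)` is unreachable under Pre_
      out ++ [no_gaps.headD missing])
    []

-- ===== PORT B =====
-- Literal port of B: consensus = list(patterns[0]); merge each later line in place.
-- B's raise on a conflicting non-gap value is excluded by Pre_ (the port keeps the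
-- existing consensus value there); line[i] out of range is excluded too.
def consensus_pattern_alt (patterns : List (List String)) (missing : String) : List String :=
  match patterns with
  | [] => []  -- patterns[0] raises IndexError in Python; excluded by Pre_
  | p0 :: rest =>
    rest.foldl
      (fun cons line =>
        (List.range p0.length).foldl
          (fun cons i =>
            let v := (PySem.List.pyGet? line (Int.ofNat i)).getD missing
            if v ≠ missing then
              if (PySem.List.pyGet? cons (Int.ofNat i)).getD missing = missing then
                cons.set i v
              else cons  -- conflict (ValueError) excluded by Pre_
            else cons)
          cons)
      p0

-- ===== PRECONDITION & SPEC =====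
-- Pre_ excludes exactly the inputs where Python A raises: empty `patterns`
-- (IndexError on patterns[0]), a line shorter than patterns[0] (IndexError on
-- line[i]), and a column holding two distinct non-missing values (ValueError).
def Pre_consensus_pattern (patterns : List (List String)) (missing : String) : Prop :=
  patterns ≠ [] ∧
  (∀ line ∈ patterns, (patterns.headD []).length ≤ line.length) ∧
  (∀ i < (patterns.headD []).length, ∀ l1 ∈ patterns, ∀ l2 ∈ patterns,
      (PySem.List.pyGet? l1 (Int.ofNat i)).getD missing ≠ missing →
      (PySem.List.pyGet? l2 (Int.ofNat i)).getD missing ≠ missing →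
      (PySem.List.pyGet? l1 (Int.ofNat i)).getD missing = (PySem.List.pyGet? l2 (Int.ofNat i)).getD missing)

instance (patterns : List (List String)) (missing : String) : Decidable (Pre_consensus_pattern patterns missing) := by
  unfold Pre_consensus_pattern; infer_instance

def pvWitness_consensus_pattern : List (List String) × String :=
  ([["a", "-", "c"], ["a", "b", "-"]], "-")

def Spec_consensus_pattern (patterns : List (List String)) (missing : String) (out : List String) : Prop := out = consensus_pattern_alt patterns missing
instance (patterns : List (List String)) (missing : String) (out : List String) : Decidable (Spec_consensus_pattern patterns missing out) := by unfold Spec_consensus_pattern; infer_instance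

-- ===== CLAIM (what is proved, stated in full; the proofs are below) =====
def Claim_equal_consensus_pattern : Prop := ∀ (patterns : List (List String)) (missing : String), Dom_consensus_pattern patterns missing → Pre_consensus_pattern patterns missing → Spec_consensus_pattern patterns missing (consensus_pattern patterns missing)

-- ===== LEMMAS AND PROOFS =====

-- f-step, in normalized getElem? form
def pvStep (missing : String) (ln : List String) (cons : List String) (i : Nat) : List String :=
  if ln[i]?.getD missing ≠ missing then
    if cons[i]?.getD missing = missing then cons.set i (ln[i]?.getD missing) else cons
  else cons

def pvFNM (lines : List (List String)) (i : Nat) (missing : String) : String :=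
  match lines with
  | [] => missing
  | ln :: rest =>
    if ln[i]?.getD missing ≠ missing then ln[i]?.getD missing else pvFNM rest i missing

theorem pvFoldSet (missing : String) (ln : List String) (m : Nat) (cons : List String) :
    ((List.range m).foldl (pvStep missing ln) cons).length = cons.length ∧
    ∀ j : Nat, ((List.range m).foldl (pvStep missing ln) cons)[j]? =
      cons[j]?.map (fun c =>
        if j < m ∧ ln[j]?.getD missing ≠ missing ∧ c = missing
        then ln[j]?.getD missing else c) := by
  induction m with
  | zero => simp
  | succ m ih =>
    obtain ⟨ihl, ihg⟩ := ih
    rw [List.range_succ, List.foldl_append, List.foldl_cons, List.foldl_nil]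
    set R := (List.range m).foldl (pvStep missing ln) cons with hRdef
    have hRm : R[m]? = cons[m]? := by
      rw [ihg]; cases cons[m]? with
      | none => rfl
      | some c => simp
    show (pvStep missing ln R m).length = cons.length ∧ _
    unfold pvStep
    by_cases hv : ln[m]?.getD missing ≠ missing
    · by_cases hc : R[m]?.getD missing = missing
      · rw [if_pos hv, if_pos hc]
        refine ⟨by rw [List.length_set, ihl], fun j => ?_⟩
        rw [List.getElem?_set]
        by_cases hjm : m = j
        · subst hjm
          rw [hRm] at hc
          rw [if_pos rfl, ihl]
          cases hcm : cons[m]? with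
          | none =>
            have : cons.length ≤ m := List.getElem?_eq_none_iff.mp hcm
            simp [Nat.not_lt.mpr this]
          | some c =>
            have hlen : m < cons.length := by
              by_contra h
              rw [List.getElem?_eq_none_iff.mpr (by omega)] at hcm
              simp at hcm
            rw [hcm] at hc
            simp only [Option.getD_some] at hc
            simp [hlen, hc, hv]
        · rw [ihg]
          cases cons[j]? with
          | none => simp [hjm]
          | some c =>
            simp only [Option.map_some, if_neg hjm]
            congr 1
            by_cases hj : j < m
            · simp [hj, show j < m + 1 by omega]
            · have hj1 : ¬ j < m + 1 := by omega
              simp [hj, hj1]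
      · rw [if_pos hv, if_neg hc]
        refine ⟨ihl, fun j => ?_⟩
        rw [ihg]
        by_cases hjm : j = m
        · subst hjm
          rw [ihg] at hc
          cases hcj : cons[j]? with
          | none => simp [hcj] at hc ⊢
          | some c =>
            rw [hcj] at hc
            simp only [Option.map_some, Option.getD_some] at hc
            have hcne : ¬ c = missing := by
              intro h; apply hc; simp [h]
            simp [hcne]
        · cases cons[j]? with
          | none => rfl
          | some c =>
            simp only [Option.map_some]
            congr 1
            by_cases hj : j < m
            · simp [hj, show j < m + 1 by omega]
            · have hj1 : ¬ j < m + 1 := by omega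
              have hjm1 : ¬ j < m + 1 := hj1
              simp [hj, hj1]
    · rw [if_neg hv]
      refine ⟨ihl, fun j => ?_⟩
      rw [ihg]
      cases cons[j]? with
      | none => rfl
      | some c =>
        simp only [Option.map_some]
        congr 1
        by_cases hjm : j = m
        · subst hjm
          simp only [ne_eq, not_not] at hv
          simp [hv]
        · by_cases hj : j < m
          · simp [hj, show j < m + 1 by omega]
          · have hj1 : ¬ j < m + 1 := by omega
            simp [hj, hj1]

theorem pvMerge (missing : String) (ln : List String) (n : Nat) (g : Nat → String) :
    (List.range n).foldl (pvStep missing ln) ((List.range n).map g) =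
      (List.range n).map (fun i =>
        if ln[i]?.getD missing ≠ missing ∧ g i = missing
        then ln[i]?.getD missing else g i) := by
  obtain ⟨hl, hg⟩ := pvFoldSet missing ln n ((List.range n).map g)
  apply List.ext_getElem?
  intro j
  rw [hg]
  by_cases hj : j < n
  · simp [hj]
  · have h1 : n ≤ j := Nat.le_of_not_lt hj
    simp [h1]

theorem pvOuter (missing : String) (lines : List (List String)) (n : Nat) (g : Nat → String) :
    lines.foldl (fun cons ln => (List.range n).foldl (pvStep missing ln) cons)
        ((List.range n).map g) =
      (List.range n).map (fun i => if g i ≠ missing then g i else pvFNM lines i missing) := by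
  induction lines generalizing g with
  | nil =>
    apply List.map_congr_left
    intro i _
    by_cases h : g i = missing <;> simp [pvFNM, h]
  | cons ln rest ih =>
    rw [List.foldl_cons, pvMerge, ih]
    apply List.map_congr_left
    intro i _
    simp only [pvFNM]
    by_cases hg : g i = missing
    · by_cases hv : ln[i]?.getD missing = missing
      · simp [hg, hv]
      · simp [hg, hv]
    · simp [hg]

theorem pvFoldAppend {α β : Type} (f : α → β) (l : List α) (acc : List β) :
    l.foldl (fun out i => out ++ [f i]) acc = acc ++ l.map f := by
  induction l generalizing acc with
  | nil => simp
  | cons x xs ih => simp [List.foldl, ih]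

theorem pvHeadFilter (patterns : List (List String)) (i : Nat) (missing : String) :
    ((patterns.map (fun ln => ln[i]?.getD missing)).filter
        (fun x => x ≠ missing)).headD missing = pvFNM patterns i missing := by
  induction patterns with
  | nil => simp [pvFNM]
  | cons p rest ih =>
    simp only [List.map_cons, List.filter_cons, pvFNM]
    by_cases h : p[i]?.getD missing = missing
    · rw [if_neg (by simp [h]), if_neg (by simp [h])]
      exact ih
    · rw [if_pos (by simp [h]), List.headD_cons, if_pos h]

theorem pvA_map (patterns : List (List String)) (missing : String) :
    consensus_pattern patterns missing =
      (List.range (patterns.headD []).length).map (fun i => pvFNM patterns i missing) := by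
  unfold consensus_pattern
  rw [pvFoldAppend]
  simp only [List.nil_append]
  refine List.map_congr_left (fun i _ => ?_)
  simp only [Int.ofNat_eq_natCast, PySem.List.pyGet?_natCast]
  exact pvHeadFilter patterns i missing

theorem pvSelfMap (p0 : List String) (missing : String) :
    p0 = (List.range p0.length).map (fun i => p0[i]?.getD missing) := by
  apply List.ext_getElem
  · simp
  · intro i h1 h2
    simp [h1]

-- ===== VERDICT (by name: the statement is the Claim_ definition above) =====
theorem consensus_pattern_spec : Claim_equal_consensus_pattern := by
  intro patterns missing _dom hpre
  unfold Spec_consensus_pattern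
  obtain ⟨hne, -, -⟩ := hpre
  match patterns with
  | [] => exact absurd rfl hne
  | p0 :: rest =>
    rw [pvA_map]
    show _ = consensus_pattern_alt (p0 :: rest) missing
    unfold consensus_pattern_alt
    have hstep : ∀ ln : List String,
        (fun (cons : List String) (i : Nat) =>
          let v := (PySem.List.pyGet? ln (Int.ofNat i)).getD missing
          if v ≠ missing then
            if (PySem.List.pyGet? cons (Int.ofNat i)).getD missing = missing then
              cons.set i v
            else cons
          else cons) = pvStep missing ln := by
      intro ln
      funext cons i
      simp [pvStep]
    simp only [List.headD_cons, hstep]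
    generalize hN : p0.length = N
    have hp0 : p0 = (List.range N).map (fun i => p0[i]?.getD missing) := by
      rw [← hN]; exact pvSelfMap p0 missing
    conv_rhs => rw [hp0]
    rw [pvOuter]
    refine List.map_congr_left (fun i _ => ?_)
    simp only [pvFNM]
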